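-- pv_equiv track=rewrite | github.com/Misley-tech/MapaDeVoces | OtrasFunciones/ContarNZerosConsecutivos.py | contar_n_zeros_consecutivos
-- ===== SOURCE A (Python) =====
-- def contar_n_zeros_consecutivos(lista,n):
--     count_zeros = 0
--     consec_n_zeros = 0
--     for num in lista:
--         if num == 0:
--             count_zeros += 1
--             if count_zeros == n:
--                 consec_n_zeros += 1
--                 count_zeros = 0
--         else:
--             count_zeros = 0
--     return consec_n_zeros
-- ===== SOURCE B (Python) =====
-- def contar_n_zeros_consecutivos(lista, n):
--     if n <= 0:
--         return 0
--     total = 0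
--     i = 0
--     tam = len(lista)
--     while i < tam:
--         j = i
--         while j < i + n and j < tam and lista[j] == 0:
--             j += 1
--         if j == i + n:
--             # a full window of n zeros starts at i
--             total += 1
--             i = j
--         elif j < tam:
--             # lista[j] != 0: every window starting in i..j contains it
--             i = j + 1
--         else:
--             # trailing zeros, fewer than n
--             break
--     return total
-- ===== Notes on version B (the rewrite author's own statement) =====
-- stated objective: alternative
-- what changed: B does a greedy window scan over positions: probe how far the zeros ahead of the cursor reach (capped at n), count a block and jump by n on success, otherwise jump past the blocking nonzero; there is no running zero-counter compared against n as in A.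
import Mathlib
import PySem

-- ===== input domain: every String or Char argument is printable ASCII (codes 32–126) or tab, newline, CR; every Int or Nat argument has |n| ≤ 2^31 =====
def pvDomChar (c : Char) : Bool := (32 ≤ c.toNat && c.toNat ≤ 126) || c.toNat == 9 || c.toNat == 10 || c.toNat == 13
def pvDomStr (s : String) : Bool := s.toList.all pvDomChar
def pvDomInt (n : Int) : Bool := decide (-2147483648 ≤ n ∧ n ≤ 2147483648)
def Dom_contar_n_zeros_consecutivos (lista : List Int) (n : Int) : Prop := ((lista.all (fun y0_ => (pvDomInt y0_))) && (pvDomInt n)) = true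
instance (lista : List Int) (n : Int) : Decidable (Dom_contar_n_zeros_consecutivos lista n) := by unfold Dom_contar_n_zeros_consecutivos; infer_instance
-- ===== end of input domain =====

-- B replaces A's per-element zero-counter with a greedy window scan: probe how far the zeros
-- ahead of the cursor reach (capped at n), take a block and jump by n on success, otherwise
-- jump past the blocking nonzero. Different algorithm, same result. Objective: alternative.

-- ===== PORT A =====
-- state = (count_zeros, consec_n_zeros)
def contar_n_zeros_consecutivos (lista : List Int) (n : Int) : Int :=
  (lista.foldl (fun (s : Int × Int) num =>
      if num == 0 then
        let cz := s.1 + 1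
        if cz == n then (0, s.2 + 1) else (cz, s.2)
      else (0, s.2)) (0, 0)).2

-- ===== PORT B =====
-- B's inner while loop: j - i = number of leading zeros of the suffix, capped at k
def pvLeadZ (k : Nat) (l : List Int) : Nat :=
  match k, l with
  | 0, _ => 0
  | _ + 1, [] => 0
  | k' + 1, x :: xs => if x == 0 then pvLeadZ k' xs + 1 else 0

-- B's outer while loop over index i, as recursion on the suffix lista[i:]
def pvAltGo (k : Nat) : List Int → Int
  | [] => 0
  | x :: xs =>
      if pvLeadZ k (x :: xs) = k then 1 + pvAltGo k (xs.drop (k - 1))   -- i = j = i + n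
      else if pvLeadZ k (x :: xs) < (x :: xs).length then
        pvAltGo k (xs.drop (pvLeadZ k (x :: xs)))                       -- i = j + 1 (nonzero at j)
      else 0                                                            -- break: trailing zeros
termination_by l => l.length
decreasing_by
  all_goals simp only [List.length_cons, List.length_drop]; omega

def contar_n_zeros_consecutivos_alt (lista : List Int) (n : Int) : Int :=
  if n ≤ 0 then 0 else pvAltGo n.toNat lista

-- ===== PRECONDITION & SPEC =====
def Spec_contar_n_zeros_consecutivos (lista : List Int) (n : Int) (out : Int) : Prop := out = contar_n_zeros_consecutivos_alt lista n
instance (lista : List Int) (n : Int) (out : Int) : Decidable (Spec_contar_n_zeros_consecutivos lista n out) := by unfold Spec_contar_n_zeros_consecutivos; infer_instance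

-- ===== CLAIM (what is proved, stated in full; the proofs are below) =====
def Claim_equal_contar_n_zeros_consecutivos : Prop := ∀ (lista : List Int) (n : Int), Dom_contar_n_zeros_consecutivos lista n → Spec_contar_n_zeros_consecutivos lista n (contar_n_zeros_consecutivos lista n)

-- ===== LEMMAS AND PROOFS =====

-- A's loop body as a named function
def pvStepA (n : Int) (s : Int × Int) (num : Int) : Int × Int :=
  if num == 0 then
    let cz := s.1 + 1
    if cz == n then (0, s.2 + 1) else (cz, s.2)
  else (0, s.2)

theorem stepA_eq (n : Int) : (fun (s : Int × Int) num =>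
      if num == 0 then
        let cz := s.1 + 1
        if cz == n then (0, s.2 + 1) else (cz, s.2)
      else (0, s.2)) = pvStepA n := rfl

-- n ≤ 0: A's counter never reaches n, so the block count stays put.
theorem foldA_nonpos (n : Int) (hn : n ≤ 0) :
    ∀ (l : List Int) (cz c : Int), 0 ≤ cz → (l.foldl (pvStepA n) (cz, c)).2 = c := by
  intro l
  induction l with
  | nil => intro cz c _; rfl
  | cons x xs ih =>
    intro cz c hcz
    simp only [List.foldl_cons, pvStepA]
    by_cases hx : x = 0
    · have hne : ¬ (cz + 1 = n) := by omega
      simp only [hx, beq_self_eq_true, if_true, beq_iff_eq, hne, if_false]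
      exact ih (cz + 1) c (by omega)
    · simp only [beq_iff_eq, hx, if_false]
      exact ih 0 c (by omega)

-- Facts about the inner scan pvLeadZ
theorem pvLeadZ_le (k : Nat) (l : List Int) : pvLeadZ k l ≤ k := by
  induction l generalizing k with
  | nil => cases k <;> simp [pvLeadZ]
  | cons x xs ih =>
    cases k with
    | zero => simp [pvLeadZ]
    | succ k' =>
      simp only [pvLeadZ]
      by_cases hx : x = 0
      · simp only [hx, beq_self_eq_true, if_true]
        have := ih k'
        omega
      · simp [hx]

theorem pvLeadZ_le_len (k : Nat) (l : List Int) : pvLeadZ k l ≤ l.length := by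
  induction l generalizing k with
  | nil => cases k <;> simp [pvLeadZ]
  | cons x xs ih =>
    cases k with
    | zero => simp [pvLeadZ]
    | succ k' =>
      simp only [pvLeadZ, List.length_cons]
      by_cases hx : x = 0
      · simp only [hx, beq_self_eq_true, if_true]
        have := ih k'
        omega
      · simp [hx]

theorem pvLeadZ_take_all (k : Nat) (l : List Int) :
    ((l.take (pvLeadZ k l)).all (fun y => y == 0)) = true := by
  induction l generalizing k with
  | nil => cases k <;> simp [pvLeadZ]
  | cons x xs ih =>
    cases k with
    | zero => simp [pvLeadZ]
    | succ k' =>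
      simp only [pvLeadZ]
      by_cases hx : x = 0
      · simp only [hx, beq_self_eq_true, if_true, List.take_succ_cons, List.all_cons,
          Bool.and_eq_true]
        exact ⟨by simp, ih k'⟩
      · simp [hx]

theorem pvLeadZ_stop (k : Nat) (l : List Int) (h1 : pvLeadZ k l < k)
    (h2 : pvLeadZ k l < l.length) :
    ∃ y rest, l.drop (pvLeadZ k l) = y :: rest ∧ ¬(y = 0) := by
  induction l generalizing k with
  | nil => simp at h2
  | cons x xs ih =>
    cases k with
    | zero => simp at h1
    | succ k' =>
      by_cases hx : x = 0
      · have hj : pvLeadZ (k' + 1) (x :: xs) = pvLeadZ k' xs + 1 := by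
          simp [pvLeadZ, hx]
        rw [hj] at h1 h2 ⊢
        simp only [List.length_cons] at h2
        simpa [List.drop_succ_cons] using ih k' (by omega) (by omega)
      · have hj : pvLeadZ (k' + 1) (x :: xs) = 0 := by simp [pvLeadZ, hx]
        rw [hj]
        exact ⟨x, xs, rfl, hx⟩

-- Consuming j all-zero elements that complete a block (cz + j = k) triggers exactly once.
theorem foldA_consume (n : Int) (k : Nat) (hn : n = (k : Int)) :
    ∀ (j : Nat) (l : List Int) (cz : Nat) (c : Int), 1 ≤ j → j ≤ l.length →
      ((l.take j).all (fun y => y == 0)) = true → cz + j = k →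
      l.foldl (pvStepA n) ((cz : Int), c) = (l.drop j).foldl (pvStepA n) (0, c + 1) := by
  intro j
  induction j with
  | zero => intro l cz c h1 _ _ _; omega
  | succ j ih =>
    intro l cz c _ hlen hall hczj
    match l with
    | [] => simp at hlen
    | x :: xs =>
      simp only [List.take_succ_cons, List.all_cons, Bool.and_eq_true, beq_iff_eq] at hall
      obtain ⟨hx, hall'⟩ := hall
      simp only [List.foldl_cons, pvStepA, hx, beq_self_eq_true, if_true, beq_iff_eq]
      by_cases hj : j = 0
      · subst hj
        have : (cz : Int) + 1 = n := by rw [hn]; omega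
        simp only [this, if_true, List.drop_succ_cons, List.drop_zero]
      · have hne : ¬ ((cz : Int) + 1 = n) := by rw [hn]; omega
        simp only [hne, if_false, List.drop_succ_cons]
        have : ((cz : Int) + 1) = ((cz + 1 : Nat) : Int) := by push_cast; ring
        rw [this]
        exact ih xs (cz + 1) c (by omega) (by simp at hlen; omega) hall' (by omega)

-- Consuming j all-zero elements that do NOT complete a block (cz + j < k) just advances cz.
theorem foldA_skip (n : Int) (k : Nat) (hn : n = (k : Int)) :
    ∀ (j : Nat) (l : List Int) (cz : Nat) (c : Int), j ≤ l.length →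
      ((l.take j).all (fun y => y == 0)) = true → cz + j < k →
      l.foldl (pvStepA n) ((cz : Int), c) =
        (l.drop j).foldl (pvStepA n) (((cz + j : Nat) : Int), c) := by
  intro j
  induction j with
  | zero => intro l cz c _ _ _; simp
  | succ j ih =>
    intro l cz c hlen hall hczj
    match l with
    | [] => simp at hlen
    | x :: xs =>
      simp only [List.take_succ_cons, List.all_cons, Bool.and_eq_true, beq_iff_eq] at hall
      obtain ⟨hx, hall'⟩ := hall
      simp only [List.foldl_cons, pvStepA, hx, beq_self_eq_true, if_true, beq_iff_eq]
      have hne : ¬ ((cz : Int) + 1 = n) := by rw [hn]; omega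
      simp only [hne, if_false, List.drop_succ_cons]
      have h1 : ((cz : Int) + 1) = ((cz + 1 : Nat) : Int) := by push_cast; ring
      rw [h1, ih xs (cz + 1) c (by simp at hlen; omega) hall' (by omega)]
      congr 2
      omega

-- Main lemma: A's fold from a fresh counter computes the greedy window count.
theorem foldA_greedy (n : Int) (k : Nat) (hk : 0 < k) (hn : n = (k : Int)) :
    ∀ (fuel : Nat) (l : List Int), l.length ≤ fuel → ∀ (c : Int),
      (l.foldl (pvStepA n) (0, c)).2 = c + pvAltGo k l := by
  intro fuel
  induction fuel with
  | zero =>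
    intro l hl c
    have : l = [] := by
      cases l with
      | nil => rfl
      | cons a as => simp at hl
    subst this
    simp [pvAltGo]
  | succ fuel ih =>
    intro l hl c
    match l with
    | [] => simp [pvAltGo]
    | x :: xs =>
      have hle := pvLeadZ_le k (x :: xs)
      have hlen := pvLeadZ_le_len k (x :: xs)
      have hall := pvLeadZ_take_all k (x :: xs)
      by_cases hj : pvLeadZ k (x :: xs) = k
      · -- full window: A's counter reaches k exactly once over these k zeros
        rw [hj] at hlen hall
        have hcons := foldA_consume n k hn k (x :: xs) 0 c hk hlen hall (by omega)
        simp only [Nat.cast_zero] at hcons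
        rw [hcons]
        have hdrop : (x :: xs).drop k = xs.drop (k - 1) := by
          cases k with
          | zero => omega
          | succ m => simp
        rw [hdrop]
        have hrec := ih (xs.drop (k - 1)) (by
            have : (xs.drop (k - 1)).length = xs.length - (k - 1) := List.length_drop
            simp only [List.length_cons] at hl
            omega) (c + 1)
        rw [hrec]
        have : pvAltGo k (x :: xs) = 1 + pvAltGo k (xs.drop (k - 1)) := by
          rw [pvAltGo, if_pos hj]
        rw [this]
        ring
      · by_cases hlt : pvLeadZ k (x :: xs) < (x :: xs).length
        · -- blocked by a nonzero: A's counter is reset there; both resume after it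
          obtain ⟨y, rest, hdrop, hy⟩ := pvLeadZ_stop k (x :: xs) (by omega) hlt
          have hskip := foldA_skip n k hn (pvLeadZ k (x :: xs)) (x :: xs) 0 c hlen hall (by omega)
          simp only [Nat.cast_zero, Nat.zero_add] at hskip
          rw [hskip, hdrop]
          simp only [List.foldl_cons, pvStepA, beq_iff_eq, hy, if_false]
          have hrest : rest = xs.drop (pvLeadZ k (x :: xs)) := by
            have h1 : rest = List.drop 1 (List.drop (pvLeadZ k (x :: xs)) (x :: xs)) := by
              rw [hdrop]
              simp
            rw [List.drop_drop, List.drop_succ_cons] at h1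
            exact h1
          rw [hrest]
          have hrec := ih (xs.drop (pvLeadZ k (x :: xs))) (by
              have : (xs.drop (pvLeadZ k (x :: xs))).length = xs.length - pvLeadZ k (x :: xs) :=
                List.length_drop
              simp only [List.length_cons] at hl
              omega) c
          rw [hrec]
          have : pvAltGo k (x :: xs) = pvAltGo k (xs.drop (pvLeadZ k (x :: xs))) := by
            rw [pvAltGo, if_neg hj, if_pos hlt]
          rw [this]
        · -- the whole (short, all-zero) suffix: the counter never reaches k
          have hfin : pvLeadZ k (x :: xs) = (x :: xs).length := by omega
          have hskip := foldA_skip n k hn (pvLeadZ k (x :: xs)) (x :: xs) 0 c hlen hall (by omega)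
          simp only [Nat.cast_zero, Nat.zero_add] at hskip
          rw [hskip]
          rw [hfin, List.drop_length]
          have : pvAltGo k (x :: xs) = 0 := by
            rw [pvAltGo, if_neg hj, if_neg hlt]
          rw [this]
          simp

-- ===== VERDICT (by name: the statement is the Claim_ definition above) =====
theorem contar_n_zeros_consecutivos_spec : Claim_equal_contar_n_zeros_consecutivos := by
  intro lista n _
  unfold Spec_contar_n_zeros_consecutivos contar_n_zeros_consecutivos contar_n_zeros_consecutivos_alt
  rw [stepA_eq]
  by_cases hn : n ≤ 0
  · simp only [hn, if_true]
    exact foldA_nonpos n hn lista 0 0 le_rfl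
  · simp only [hn, if_false]
    have hk : 0 < n.toNat := by omega
    have hn' : n = (n.toNat : Int) := by omega
    have := foldA_greedy n n.toNat hk hn' lista.length lista le_rfl 0
    simpa using this
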